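-- pv_equiv track=rewrite | github.com/JeongBeomi/Algorithm_sol | 프로그래머스/lv1/42862. 체육복/체육복.py | solution
-- ===== SOURCE A (Python) =====
-- def solution(n, lost, reserve):
--     answer = 0
--     lost = set(lost)
--     # 여분있지만 도난당한 사람 먼저 구해서 빼기
--     temp = set(lost) & set(reserve)
--     lost -= temp
--     reserve = sorted(list(set(reserve) - temp))
--
--     for r in reserve:
--         if r - 1 in lost:
--             lost -= {r - 1}
--         elif r + 1 in lost:
--             lost -= {r + 1}
--
--     answer = n - len(lost)
--     return answer
-- ===== SOURCE B (Python) =====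
-- def solution(n, lost, reserve):
--     ls, rs = set(lost), set(reserve)
--     L = sorted(ls - rs)   # still-unclothed students, ascending
--     R = sorted(rs - ls)   # usable spare uniforms, ascending
--     i = j = matched = 0
--     while i < len(L) and j < len(R):
--         if abs(L[i] - R[j]) <= 1:
--             matched += 1
--             i += 1
--             j += 1
--         elif L[i] < R[j]:
--             i += 1
--         else:
--             j += 1
--     return n - (len(L) - matched)
-- ===== Notes on version B (the rewrite author's own statement) =====
-- stated objective: alternative
-- what changed: A mutates a lost-set while iterating over the sorted reserves; B never mutates a set during the scan: it sorts both difference sets once and walks them with a classic two-pointer merge, counting matches.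
import Mathlib
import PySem

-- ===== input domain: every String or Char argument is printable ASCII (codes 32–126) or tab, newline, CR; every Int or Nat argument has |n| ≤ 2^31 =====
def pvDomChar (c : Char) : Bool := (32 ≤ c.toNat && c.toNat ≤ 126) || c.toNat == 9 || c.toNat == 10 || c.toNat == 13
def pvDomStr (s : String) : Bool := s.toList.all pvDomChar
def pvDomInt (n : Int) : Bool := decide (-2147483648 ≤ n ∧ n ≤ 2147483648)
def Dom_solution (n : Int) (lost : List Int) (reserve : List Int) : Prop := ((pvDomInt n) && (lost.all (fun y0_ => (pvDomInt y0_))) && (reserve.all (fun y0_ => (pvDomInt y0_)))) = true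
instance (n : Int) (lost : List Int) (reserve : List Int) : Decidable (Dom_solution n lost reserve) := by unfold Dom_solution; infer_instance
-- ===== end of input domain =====

-- B replaces A's per-reserve mutation of the lost-set by a single two-pointer walk over the two sorted difference lists; same return value (objective: alternative decomposition).

-- ===== PORT A =====
-- body of A's for-loop: reserve student r gives a uniform to r-1 if lost, else to r+1
def lossStep (l : PySem.Set Int) (r : Int) : PySem.Set Int :=
  if PySem.Set.contains l (r - 1) then PySem.Set.diff l [r - 1]
  else if PySem.Set.contains l (r + 1) then PySem.Set.diff l [r + 1]
  else l

def solution (n : Int) (lost : List Int) (reserve : List Int) : Int :=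
  let lost0 : PySem.Set Int := PySem.Set.ofList lost
  let temp : PySem.Set Int := PySem.Set.inter lost0 (PySem.Set.ofList reserve)
  let lost1 : PySem.Set Int := PySem.Set.diff lost0 temp
  let reserve1 : List Int := PySem.List.sorted (PySem.Set.diff (PySem.Set.ofList reserve) temp) (fun x => x) false
  let final : PySem.Set Int := reserve1.foldl lossStep lost1
  n - PySem.Set.len final

-- ===== PORT B =====
-- Source B's while-loop: two pointers over the sorted lists, as structural recursion on the suffixes
def twoPtr : List Int → List Int → Int
  | l :: ls, r :: rs =>
    if (l - r).natAbs ≤ 1 then 1 + twoPtr ls rs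
    else if l < r then twoPtr ls (r :: rs)
    else twoPtr (l :: ls) rs
  | _, _ => 0

def solution_alt (n : Int) (lost : List Int) (reserve : List Int) : Int :=
  let ls : PySem.Set Int := PySem.Set.ofList lost
  let rs : PySem.Set Int := PySem.Set.ofList reserve
  let L : List Int := PySem.List.sorted (PySem.Set.diff ls rs) (fun x => x) false
  let R : List Int := PySem.List.sorted (PySem.Set.diff rs ls) (fun x => x) false
  n - ((L.length : Int) - twoPtr L R)

-- ===== PRECONDITION & SPEC =====
def Spec_solution (n : Int) (lost : List Int) (reserve : List Int) (out : Int) : Prop := out = solution_alt n lost reserve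
instance (n : Int) (lost : List Int) (reserve : List Int) (out : Int) : Decidable (Spec_solution n lost reserve out) := by unfold Spec_solution; infer_instance

-- ===== CLAIM (what is proved, stated in full; the proofs are below) =====
def Claim_equal_solution : Prop := ∀ (n : Int) (lost : List Int) (reserve : List Int), Dom_solution n lost reserve → Spec_solution n lost reserve (solution n lost reserve)

-- ===== LEMMAS AND PROOFS =====

-- lossStep respects permutation of the lost-set
theorem lossStep_perm {l l' : PySem.Set Int} (h : l.Perm l') (r : Int) :
    (lossStep l r).Perm (lossStep l' r) := by
  unfold lossStep PySem.Set.contains PySem.Set.diff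
  rw [List.Perm.contains_eq h, List.Perm.contains_eq h]
  split_ifs <;> first | exact h.filter _ | exact h

theorem foldl_lossStep_perm {l l' : PySem.Set Int} (h : l.Perm l') (R : List Int) :
    (R.foldl lossStep l).Perm (R.foldl lossStep l') := by
  induction R generalizing l l' with
  | nil => exact h
  | cons r R ih => exact ih (lossStep_perm h r)

-- r matches nothing: the step is the identity
theorem lossStep_id {X : List Int} {r : Int} (h1 : (r - 1) ∉ X) (h2 : (r + 1) ∉ X) :
    lossStep X r = X := by
  unfold lossStep PySem.Set.contains
  rw [if_neg, if_neg] <;> simp_all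

-- r cannot touch the head l of the lost list: the step passes l through
theorem lossStep_cons {l : Int} {X : List Int} {r : Int} (h1 : r - 1 ≠ l) (h2 : r + 1 ≠ l) :
    lossStep (l :: X) r = l :: lossStep X r := by
  unfold lossStep PySem.Set.contains PySem.Set.diff
  simp only [List.contains_cons]
  simp only [List.filter_cons]
  have e1 : ¬ (r - 1 = l) := h1
  have e2 : ¬ (r + 1 = l) := h2
  simp [e1, e2, h1.symm, h2.symm]
  split_ifs <;> simp

-- no reserve in R can ever clothe l: l survives the whole fold
theorem foldl_lossStep_cons {l : Int} (R : List Int) (X : List Int)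
    (h : ∀ r ∈ R, l + 1 < r) :
    R.foldl lossStep (l :: X) = l :: R.foldl lossStep X := by
  induction R generalizing X with
  | nil => rfl
  | cons r R ih =>
    have hr := h r (by simp)
    rw [List.foldl_cons, List.foldl_cons, lossStep_cons (by omega) (by omega)]
    exact ih _ (fun r' hr' => h r' (by simp [hr']))

theorem foldl_lossStep_nil (R : List Int) : R.foldl lossStep [] = [] := by
  induction R with
  | nil => rfl
  | cons r R ih => simpa [lossStep, PySem.Set.contains] using ih

-- adjacent reserve r = l ± 1 clothes exactly the minimum l of the sorted lost list
theorem lossStep_match {l : Int} {X : List Int} (hp : (l :: X).Pairwise (· < ·)) {r : Int}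
    (hr : r = l + 1 ∨ r = l - 1) : lossStep (l :: X) r = X := by
  have hlt : ∀ x ∈ X, l < x := (List.pairwise_cons.mp hp).1
  have hX : ∀ x ∈ X, x ≠ l := fun x hx => by have := hlt x hx; omega
  have hdiff : PySem.Set.diff (l :: X) [l] = X := by
    unfold PySem.Set.diff
    simp only [List.filter_cons]
    rw [List.filter_eq_self.mpr (by intro x hx; simp [hX x hx])]
    simp
  rcases hr with h | h <;> unfold lossStep PySem.Set.contains
  · rw [if_pos (by simp [h])]
    simpa [h] using hdiff
  · rw [if_neg, if_pos (by simp [h])]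
    · simpa [h, show l - 1 + 1 = l by omega] using hdiff
    · have : r - 1 = l - 2 := by omega
      simp only [this, List.contains_cons]
      simp only [Bool.or_eq_true, beq_iff_eq, List.contains_eq_mem, decide_eq_true_eq]
      push Not
      exact ⟨by omega, fun hm => by have := hlt _ hm; omega⟩

-- MAIN INVARIANT: on sorted disjoint lists, A's fold leaves exactly |L| - twoPtr L R students unclothed
theorem main_inv : ∀ (L R : List Int), L.Pairwise (· < ·) → R.Pairwise (· < ·) →
    (∀ x ∈ L, x ∉ R) →
    ((R.foldl lossStep L).length : Int) = (L.length : Int) - twoPtr L R := by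
  intro L R
  induction L, R using twoPtr.induct with
  | case1 l ls r rs hnear ih =>
    intro hL hR hd
    have hne : l ≠ r := fun e => hd l (by simp) (by simp [e])
    have hr : r = l + 1 ∨ r = l - 1 := by omega
    rw [List.foldl_cons, lossStep_match hL hr]
    rw [ih (List.pairwise_cons.mp hL).2 (List.pairwise_cons.mp hR).2
        (fun x hx hm => hd x (by simp [hx]) (by simp [hm]))]
    rw [show twoPtr (l :: ls) (r :: rs) = 1 + twoPtr ls rs by rw [twoPtr]; rw [if_pos hnear]]
    simp; ring
  | case2 l ls r rs hnear hlt ih =>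
    intro hL hR hd
    have hmin : ∀ r' ∈ r :: rs, l + 1 < r' := by
      intro r' hr'
      rcases List.mem_cons.mp hr' with h | h
      · omega
      · have := (List.pairwise_cons.mp hR).1 r' h; omega
    rw [foldl_lossStep_cons _ _ hmin]
    rw [show twoPtr (l :: ls) (r :: rs) = twoPtr ls (r :: rs) by
      rw [twoPtr]; rw [if_neg hnear, if_pos hlt]]
    rw [List.length_cons, List.length_cons]
    push_cast
    rw [ih (List.pairwise_cons.mp hL).2 hR (fun x hx => hd x (by simp [hx]))]
    ring
  | case3 l ls r rs hnear hge ih =>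
    intro hL hR hd
    have hne : l ≠ r := fun e => hd l (by simp) (by simp [e])
    have hrl : r + 1 < l := by omega
    have hstep : lossStep (l :: ls) r = l :: ls := by
      apply lossStep_id
      · intro hm
        rcases List.mem_cons.mp hm with h | h
        · omega
        · have := (List.pairwise_cons.mp hL).1 _ h; omega
      · intro hm
        rcases List.mem_cons.mp hm with h | h
        · omega
        · have := (List.pairwise_cons.mp hL).1 _ h; omega
    rw [List.foldl_cons, hstep]
    rw [show twoPtr (l :: ls) (r :: rs) = twoPtr (l :: ls) rs by
      rw [twoPtr]; rw [if_neg hnear, if_neg hge]]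
    exact ih hL (List.pairwise_cons.mp hR).2
      (fun x hx hm => hd x hx (by simp [hm]))
  | case4 L R h =>
    intro hL hR hd
    match L, R with
    | [], R => simp [foldl_lossStep_nil, twoPtr]
    | l :: ls, [] => simp [twoPtr]
    | l :: ls, r :: rs => exact absurd rfl ((h l ls r rs rfl))

-- the double subtraction through temp in A equals the plain set differences B takes
theorem diff_inter_left (ls rs : List Int) :
    PySem.Set.diff ls (PySem.Set.inter ls rs) = PySem.Set.diff ls rs := by
  unfold PySem.Set.diff PySem.Set.inter
  apply List.filter_congr
  intro x hx
  congr 1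
  simp [List.contains_eq_mem, hx]

theorem diff_inter_right (ls rs : List Int) :
    PySem.Set.diff rs (PySem.Set.inter ls rs) = PySem.Set.diff rs ls := by
  unfold PySem.Set.diff PySem.Set.inter
  apply List.filter_congr
  intro x hx
  congr 1
  simp [List.contains_eq_mem, hx]

theorem sorted_diff_pairwise (xs : List Int) (ys : List Int) :
    (PySem.List.sorted (PySem.Set.diff (PySem.Set.ofList xs) ys) (fun x => x) false).Pairwise (· < ·) := by
  have hnd : (PySem.List.sorted (PySem.Set.diff (PySem.Set.ofList xs) ys) (fun x => x) false).Nodup :=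
    (PySem.List.sorted_perm _ _ _).nodup_iff.mpr ((PySem.Set.nodup_ofList xs).filter _)
  have hle := PySem.List.sorted_pairwise (PySem.Set.diff (PySem.Set.ofList xs) ys) (fun x => x)
  exact (hle.and hnd).imp (fun h => lt_of_le_of_ne h.1 h.2)

theorem solution_eq (n : Int) (lost : List Int) (reserve : List Int) :
    solution n lost reserve = solution_alt n lost reserve := by
  show (solution n lost reserve) = _
  unfold solution solution_alt
  dsimp only
  rw [diff_inter_left, diff_inter_right]
  set ls := PySem.Set.ofList lost
  set rs := PySem.Set.ofList reserve
  set L := PySem.List.sorted (PySem.Set.diff ls rs) (fun x => x) false with hLdef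
  set R := PySem.List.sorted (PySem.Set.diff rs ls) (fun x => x) false with hRdef
  have hperm : (R.foldl lossStep (PySem.Set.diff ls rs)).Perm (R.foldl lossStep L) :=
    foldl_lossStep_perm (PySem.List.sorted_perm _ _ _).symm R
  have hdisj : ∀ x ∈ L, x ∉ R := by
    intro x hxL hxR
    rw [hLdef, PySem.List.mem_sorted] at hxL
    rw [hRdef, PySem.List.mem_sorted] at hxR
    unfold PySem.Set.diff at hxL hxR
    rw [List.mem_filter] at hxL hxR
    simp [List.contains_eq_mem] at hxL hxR
    exact hxL.2 hxR.1
  have hmain := main_inv L R (sorted_diff_pairwise lost rs) (sorted_diff_pairwise reserve ls) hdisj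
  unfold PySem.Set.len
  rw [hperm.length_eq, hmain]

-- ===== VERDICT (by name: the statement is the Claim_ definition above) =====
theorem solution_spec : Claim_equal_solution := by
  intro n lost reserve _
  exact solution_eq n lost reserve
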